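-- pv_equiv track=rewrite | github.com/PipFoweraker/pdoom1 | tools/generate_images.py | filter_assets
-- ===== SOURCE A (Python) =====
-- def filter_assets(assets, category=None, status=None, ids=None):
--     """Filter assets based on criteria."""
--     filtered = assets
--
--     if category:
--         filtered = [a for a in filtered if a.get('category') == category]
--
--     if status:
--         filtered = [a for a in filtered if a.get('status') == status]
--
--     if ids:
--         id_set = set(ids)
--         filtered = [a for a in filtered if a.get('id') in id_set]
--
--     return filtered
-- ===== SOURCE B (Python) =====
-- def filter_assets(assets, category=None, status=None, ids=None):
--     """Filter assets based on criteria (single combined pass)."""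
--     id_set = set(ids) if ids else None
--     if not category and not status and id_set is None:
--         return assets
--
--     def keep(a):
--         if category and a.get('category') != category:
--             return False
--         if status and a.get('status') != status:
--             return False
--         if id_set is not None and a.get('id') not in id_set:
--             return False
--         return True
--
--     return [a for a in assets if keep(a)]
-- ===== Notes on version B (the rewrite author's own statement) =====
-- stated objective: alternative
-- what changed: Replaces A's up-to-three sequential list-comprehension passes (each building an intermediate list) with one combined predicate applied in a single pass, returning the original list when no criterion is active.
import Mathlib
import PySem

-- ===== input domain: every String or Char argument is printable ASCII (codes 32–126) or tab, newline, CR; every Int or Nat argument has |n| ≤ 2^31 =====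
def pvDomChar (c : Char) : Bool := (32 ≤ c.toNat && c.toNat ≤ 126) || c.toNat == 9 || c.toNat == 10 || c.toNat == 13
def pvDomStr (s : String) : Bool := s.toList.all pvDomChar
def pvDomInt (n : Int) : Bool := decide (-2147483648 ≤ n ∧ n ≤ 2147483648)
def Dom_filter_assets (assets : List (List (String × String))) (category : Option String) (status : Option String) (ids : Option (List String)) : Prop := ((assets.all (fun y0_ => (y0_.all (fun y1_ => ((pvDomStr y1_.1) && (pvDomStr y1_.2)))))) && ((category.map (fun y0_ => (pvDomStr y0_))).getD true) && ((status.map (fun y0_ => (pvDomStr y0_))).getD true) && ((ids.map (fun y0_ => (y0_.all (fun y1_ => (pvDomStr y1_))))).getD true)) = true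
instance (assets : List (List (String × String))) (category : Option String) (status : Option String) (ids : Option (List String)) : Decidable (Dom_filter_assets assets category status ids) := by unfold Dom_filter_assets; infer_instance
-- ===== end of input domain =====

-- ===== PORT A =====
def pvGet (a : List (String × String)) (k : String) : Option String :=
  (PySem.Dict.mk a).get? k

-- B merges A's up-to-three sequential filtering passes into one combined pass (objective: alternative decomposition).
def pvTruthyS : Option String → Bool
  | some s => decide (s ≠ "")
  | none => false

def pvTruthyL : Option (List String) → Bool
  | some l => decide (l ≠ [])
  | none => false

def pvMemId (idSet : PySem.Set String) (a : List (String × String)) : Bool :=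
  match pvGet a "id" with
  | some i => PySem.Set.contains idSet i
  | none => false

def filter_assets (assets : List (List (String × String))) (category : Option String) (status : Option String) (ids : Option (List String)) : List (List (String × String)) :=
  let filtered := assets
  let filtered := if pvTruthyS category then
      filtered.filter (fun a => pvGet a "category" == category)
    else filtered
  let filtered := if pvTruthyS status then
      filtered.filter (fun a => pvGet a "status" == status)
    else filtered
  let filtered := if pvTruthyL ids then
      let idSet := PySem.Set.ofList (ids.getD [])
      filtered.filter (fun a => pvMemId idSet a)
    else filtered
  filtered


-- ===== PORT B =====
def pvKeep (category : Option String) (status : Option String) (idSet : Option (PySem.Set String)) (a : List (String × String)) : Bool :=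
  if pvTruthyS category && !(pvGet a "category" == category) then false
  else if pvTruthyS status && !(pvGet a "status" == status) then false
  else if (match idSet with
           | some s => !(pvMemId s a)
           | none => false) then false
  else true

def filter_assets_alt (assets : List (List (String × String))) (category : Option String) (status : Option String) (ids : Option (List String)) : List (List (String × String)) :=
  let idSet : Option (PySem.Set String) :=
    if pvTruthyL ids then some (PySem.Set.ofList (ids.getD [])) else none
  if !pvTruthyS category && !pvTruthyS status && idSet.isNone then assets
  else assets.filter (pvKeep category status idSet)


-- ===== PRECONDITION & SPEC =====
def Spec_filter_assets (assets : List (List (String × String))) (category : Option String) (status : Option String) (ids : Option (List String)) (out : List (List (String × String))) : Prop := out = filter_assets_alt assets category status ids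
instance (assets : List (List (String × String))) (category : Option String) (status : Option String) (ids : Option (List String)) (out : List (List (String × String))) : Decidable (Spec_filter_assets assets category status ids out) := by unfold Spec_filter_assets; infer_instance

-- ===== CLAIM (what is proved, stated in full; the proofs are below) =====
def Claim_equal_filter_assets : Prop := ∀ (assets : List (List (String × String))) (category : Option String) (status : Option String) (ids : Option (List String)), Dom_filter_assets assets category status ids → Spec_filter_assets assets category status ids (filter_assets assets category status ids)

-- ===== LEMMAS AND PROOFS =====
theorem pv_beq_decide {α : Type} [BEq α] [LawfulBEq α] [DecidableEq α] (x y : α) :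
    (x == y) = decide (x = y) := by
  by_cases h : x = y <;> simp [h]

theorem keep_of_inactive (category status : Option String) (a : List (String × String))
    (hc : pvTruthyS category = false) (hs : pvTruthyS status = false) :
    pvKeep category status none a = true := by
  simp [pvKeep, hc, hs]

theorem A_eq_filter_keep (assets : List (List (String × String))) (category status : Option String)
    (ids : Option (List String)) :
    filter_assets assets category status ids =
      assets.filter (pvKeep category status
        (if pvTruthyL ids then some (PySem.Set.ofList (ids.getD [])) else none)) := by
  unfold filter_assets
  cases hc : pvTruthyS category <;> cases hs : pvTruthyS status <;> cases hi : pvTruthyL ids <;>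
    simp [List.filter_filter] <;>
    first
    | (symm; rw [List.filter_eq_self]; intro a _; simp [pvKeep, hc, hs])
    | (apply List.filter_congr; intro a _; simp [pvKeep, hc, hs, Bool.and_comm, Bool.and_assoc, pv_beq_decide])


-- ===== VERDICT (by name: the statement is the Claim_ definition above) =====
theorem filter_assets_spec : Claim_equal_filter_assets := by
  intro assets category status ids _
  unfold Spec_filter_assets filter_assets_alt
  rw [A_eq_filter_keep]
  cases hc : pvTruthyS category <;> cases hs : pvTruthyS status <;> cases hi : pvTruthyL ids <;>
    simp [hc, hs, hi]
  exact fun a _ => keep_of_inactive category status a hc hs
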